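-- pv_equiv track=rewrite | github.com/alliedvision/VmbPy | vimba/c_binding/util.py | _split_into_powers_of_two
-- ===== SOURCE A (Python) =====
-- def _split_into_powers_of_two(num: int):
--     result = []
--     for mask in [1 << i for i in range(32)]:
--         if mask & num:
--             result.append(mask)
--
--     if not result:
--         result.append(0)
--
--     return tuple(result)
-- ===== SOURCE B (Python) =====
-- def _split_into_powers_of_two(num: int):
--     n = num & 0xFFFFFFFF
--     result = []
--     while n:
--         low = n & -n
--         result.append(low)
--         n ^= low
--     if not result:
--         result.append(0)
--     return tuple(result)
-- ===== Notes on version B (the rewrite author's own statement) =====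
-- stated objective: idiomatic
-- what changed: Instead of scanning every fixed mask position, B restricts the input to its low thirty-two bits and repeatedly extracts the lowest set bit with n & -n, iterating only over the set bits.
import Mathlib
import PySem

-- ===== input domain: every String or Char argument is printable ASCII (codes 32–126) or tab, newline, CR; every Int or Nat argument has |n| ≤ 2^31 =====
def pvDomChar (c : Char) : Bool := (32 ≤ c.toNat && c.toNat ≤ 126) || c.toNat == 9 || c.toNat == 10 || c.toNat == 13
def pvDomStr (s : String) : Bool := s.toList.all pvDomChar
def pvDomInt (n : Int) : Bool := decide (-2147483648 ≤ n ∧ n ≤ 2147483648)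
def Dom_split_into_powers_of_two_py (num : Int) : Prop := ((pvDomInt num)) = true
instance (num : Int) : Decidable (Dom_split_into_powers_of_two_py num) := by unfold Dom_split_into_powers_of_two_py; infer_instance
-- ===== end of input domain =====

-- B iterates only over the SET bits of the low 32 bits (lowest-set-bit extraction) instead of
-- scanning all 32 mask positions; same return value everywhere (both are total).

-- ===== PORT A =====
-- literal port of A: build the 32 masks [1 << i for i in range(32)], append the masks that
-- intersect num, then append 0 if nothing was collected.
def split_into_powers_of_two_py (num : Int) : List Int :=
  let masks := (PySem.List.pyRange 0 32 1).map (fun i => (1 : Int) <<< i.toNat)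
  let result := masks.foldl (fun acc mask => if PySem.Int.band mask num ≠ 0 then acc ++ [mask] else acc) []
  if result = [] then [0] else result

-- ===== PORT B =====
-- the while loop of Source B; the fuel 32 only bounds the iteration count (n has at most 32 set
-- bits and each pass clears one), it never changes the computed value.
def pvAltLoop : Nat → Int → List Int → List Int
  | 0, _, acc => acc
  | fuel + 1, n, acc =>
    if n = 0 then acc
    else
      let low := PySem.Int.band n (-n)
      pvAltLoop fuel (PySem.Int.bxor n low) (acc ++ [low])

def split_into_powers_of_two_py_alt (num : Int) : List Int :=
  let n := PySem.Int.band num 0xFFFFFFFF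
  let result := pvAltLoop 32 n []
  if result = [] then [0] else result

-- ===== PRECONDITION & SPEC =====
def Spec_split_into_powers_of_two_py (num : Int) (out : List Int) : Prop := out = split_into_powers_of_two_py_alt num
instance (num : Int) (out : List Int) : Decidable (Spec_split_into_powers_of_two_py num out) := by unfold Spec_split_into_powers_of_two_py; infer_instance

-- ===== CLAIM (what is proved, stated in full; the proofs are below) =====
def Claim_equal_split_into_powers_of_two_py : Prop := ∀ (num : Int), Dom_split_into_powers_of_two_py num → Spec_split_into_powers_of_two_py num (split_into_powers_of_two_py num)

-- ===== LEMMAS AND PROOFS =====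

-- the low 32 bits of num, as a natural number
def pvM (num : Int) : Nat := (PySem.Int.band num 4294967295).toNat

-- the ascending list of set-bit powers, by binary (low-bit-first) recursion
def pvBitsL (m : Nat) : List Int :=
  if m = 0 then []
  else if m % 2 = 1 then 1 :: (pvBitsL (m / 2)).map (2 * ·)
  else (pvBitsL (m / 2)).map (2 * ·)
decreasing_by all_goals omega

-- the same list described positionally, as A builds it
def pvBitsUp (k m : Nat) : List Int :=
  ((List.range k).filter (m.testBit ·)).map (fun i => ((2 : Int) ^ i))

theorem pvM_of_nonneg (num : Int) (h : 0 ≤ num) : pvM num = num.toNat % 2 ^ 32 := by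
  unfold pvM PySem.Int.band
  rw [if_pos h, if_pos (show (0 : Int) ≤ 4294967295 by norm_num), Int.toNat_natCast,
      show (4294967295 : Int).toNat = 2 ^ 32 - 1 by decide, Nat.and_two_pow_sub_one_eq_mod]

theorem pvM_of_neg (num : Int) (h : ¬ 0 ≤ num) :
    pvM num = 2 ^ 32 - ((-num - 1).toNat % 2 ^ 32 + 1) := by
  unfold pvM PySem.Int.band
  rw [if_neg h, if_pos (show (0 : Int) ≤ 4294967295 by norm_num), Int.toNat_natCast,
      show (4294967295 : Int).toNat = 2 ^ 32 - 1 by decide, Nat.and_comm,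
      Nat.and_two_pow_sub_one_eq_mod]
  omega

theorem pvM_lt (num : Int) : pvM num < 2 ^ 32 := by
  by_cases h : 0 ≤ num
  · rw [pvM_of_nonneg num h]; exact Nat.mod_lt _ (by norm_num)
  · rw [pvM_of_neg num h]; omega

theorem pvM_cast (num : Int) : PySem.Int.band num 4294967295 = ((pvM num : Nat) : Int) := by
  have h0 : 0 ≤ PySem.Int.band num 4294967295 := by
    rw [PySem.Int.band_comm]
    exact PySem.Int.band_nonneg_of_nonneg_left num (by norm_num)
  unfold pvM
  omega

-- A's per-mask test agrees with the k-th bit of the masked value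
theorem pvTest_eq (num : Int) (k : Nat) (hk : k < 32) :
    (PySem.Int.band ((2 : Int) ^ k) num ≠ 0) ↔ (pvM num).testBit k = true := by
  have h2k : ((2 : Int) ^ k).toNat = 2 ^ k := by
    rw [show ((2 : Int) ^ k) = ((2 ^ k : Nat) : Int) by push_cast; ring, Int.toNat_natCast]
  have h2pos : 0 < 2 ^ k := Nat.two_pow_pos k
  by_cases h : 0 ≤ num
  · rw [pvM_of_nonneg num h, PySem.Int.band_of_nonneg (by positivity) h, h2k,
        Nat.two_pow_and, Nat.testBit_mod_two_pow]
    rcases hb : num.toNat.testBit k <;> simp [hb, hk] <;> omega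
  · rw [pvM_of_neg num h]
    unfold PySem.Int.band
    rw [if_pos (show (0 : Int) ≤ 2 ^ k by positivity), if_neg h, h2k, Nat.two_pow_and]
    have hlt : (-num - 1).toNat % 2 ^ 32 < 2 ^ 32 := Nat.mod_lt _ (by norm_num)
    rw [Nat.testBit_two_pow_sub_succ hlt, Nat.testBit_mod_two_pow]
    rcases hb : (-num - 1).toNat.testBit k <;> simp [hb, hk] <;> omega

-- ---- Nat-level facts about the lowest set bit ----

theorem pvOdd_and (q : Nat) : (2 * q + 1) &&& (2 * q) = 2 * q := by
  apply Nat.eq_of_testBit_eq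
  intro i
  rw [Nat.testBit_and]
  have h1 : (2 * q + 1) / 2 = q := by omega
  have h2 : (2 * q) / 2 = q := by omega
  have e0 : (2 * q) % 2 = 0 := by omega
  have e1 : (2 * q + 1) % 2 = 1 := by omega
  cases i with
  | zero => simp [Nat.testBit_zero, e0, e1]
  | succ i => simp [Nat.testBit_succ, h1, h2]

theorem pvEven_and (q : Nat) (hq : q ≠ 0) : (2 * q) &&& (2 * q - 1) = 2 * ((q &&& (q - 1))) := by
  apply Nat.eq_of_testBit_eq
  intro i
  have h1 : (2 * q) / 2 = q := by omega
  have h2 : (2 * q - 1) / 2 = q - 1 := by omega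
  have h3 : (2 * (q &&& (q - 1))) / 2 = q &&& (q - 1) := by omega
  have e0 : (2 * q) % 2 = 0 := by omega
  have e1 : (2 * q - 1) % 2 = 1 := by omega
  have e2 : (2 * (q &&& (q - 1))) % 2 = 0 := by omega
  rw [Nat.testBit_and]
  cases i with
  | zero => simp [Nat.testBit_zero, e0, e1, e2]
  | succ i => simp [Nat.testBit_succ, h1, h2, h3, Nat.testBit_and]

theorem pvXor_two_mul (a b : Nat) : (2 * a) ^^^ (2 * b) = 2 * (a ^^^ b) := by
  apply Nat.eq_of_testBit_eq
  intro i
  have h1 : (2 * a) / 2 = a := by omega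
  have h2 : (2 * b) / 2 = b := by omega
  have h3 : (2 * (a ^^^ b)) / 2 = a ^^^ b := by omega
  have e0 : (2 * a) % 2 = 0 := by omega
  have e1 : (2 * b) % 2 = 0 := by omega
  have e2 : (2 * (a ^^^ b)) % 2 = 0 := by omega
  rw [Nat.testBit_xor]
  cases i with
  | zero => simp [Nat.testBit_zero, e0, e1, e2]
  | succ i => simp [Nat.testBit_succ, h1, h2, h3, Nat.testBit_xor]

theorem pvXor_odd_one (q : Nat) : (2 * q + 1) ^^^ 1 = 2 * q := by
  apply Nat.eq_of_testBit_eq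
  intro i
  have h1 : (2 * q + 1) / 2 = q := by omega
  have h2 : (2 * q) / 2 = q := by omega
  have e0 : (2 * q) % 2 = 0 := by omega
  have e1 : (2 * q + 1) % 2 = 1 := by omega
  rw [Nat.testBit_xor]
  cases i with
  | zero => simp [Nat.testBit_zero, e0, e1]
  | succ i => simp [Nat.testBit_succ, h1, h2, Nat.testBit_xor]

-- n & -n on a natural-number input, expressed on Nat
def pvLowb (m : Nat) : Nat := m - (m &&& (m - 1))

theorem pvBand_neg_self (m : Nat) (hm : m ≠ 0) :
    PySem.Int.band ((m : Nat) : Int) (-((m : Nat) : Int)) = ((pvLowb m : Nat) : Int) := by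
  unfold PySem.Int.band pvLowb
  have h1 : (0 : Int) ≤ (m : Int) := Int.natCast_nonneg m
  have h2 : ¬ (0 : Int) ≤ -(m : Int) := by omega
  simp only [h1, h2, if_true, if_false]
  have h3 : (-(-(m : Int)) - 1).toNat = m - 1 := by omega
  have h4 : ((m : Int)).toNat = m := by omega
  rw [h3, h4]

theorem pvLowb_odd (q : Nat) : pvLowb (2 * q + 1) = 1 := by
  unfold pvLowb
  have : (2 * q + 1) - 1 = 2 * q := by omega
  rw [this, pvOdd_and]; omega

theorem pvLowb_even (q : Nat) (hq : q ≠ 0) : pvLowb (2 * q) = 2 * pvLowb q := by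
  unfold pvLowb
  have : (2 * q) - 1 = 2 * q - 1 := rfl
  rw [pvEven_and q hq]
  have hle : q &&& (q - 1) ≤ q := Nat.and_le_left
  omega

-- the loop only appends: its accumulator factors out
theorem pvAltLoop_acc (fuel : Nat) : ∀ (n : Int) (acc : List Int),
    pvAltLoop fuel n acc = acc ++ pvAltLoop fuel n [] := by
  induction fuel with
  | zero => intro n acc; simp [pvAltLoop]
  | succ f ih =>
    intro n acc
    by_cases hn : n = 0
    · simp [pvAltLoop, hn]
    · simp only [pvAltLoop, hn, if_false]
      rw [ih _ (acc ++ [PySem.Int.band n (-n)]), ih _ ([] ++ [PySem.Int.band n (-n)])]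
      simp

-- doubling the input doubles every extracted bit
theorem pvAltLoop_double (fuel : Nat) : ∀ (q : Nat),
    pvAltLoop fuel (((2 * q : Nat) : Nat) : Int) [] = (pvAltLoop fuel ((q : Nat) : Int) []).map (2 * ·) := by
  induction fuel with
  | zero => intro q; simp [pvAltLoop]
  | succ f ih =>
    intro q
    by_cases hq : q = 0
    · subst hq; simp [pvAltLoop]
    · have h2q : ((2 * q : Nat) : Int) ≠ 0 := by
        simp; omega
      have hqq : ((q : Nat) : Int) ≠ 0 := by
        simp; omega
      simp only [pvAltLoop, h2q, hqq, if_false]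
      rw [pvBand_neg_self (2 * q) (by omega), pvBand_neg_self q hq]
      rw [pvLowb_even q hq]
      have hx1 : PySem.Int.bxor ((2 * q : Nat) : Int) ((2 * pvLowb q : Nat) : Int)
          = (((2 * (q ^^^ pvLowb q) : Nat) : Nat) : Int) := by
        rw [PySem.Int.bxor_natCast, pvXor_two_mul]
      have hx2 : PySem.Int.bxor ((q : Nat) : Int) ((pvLowb q : Nat) : Int)
          = (((q ^^^ pvLowb q : Nat) : Nat) : Int) := by
        rw [PySem.Int.bxor_natCast]
      rw [hx1, hx2]
      rw [pvAltLoop_acc f _ ([] ++ [((2 * pvLowb q : Nat) : Int)]),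
          pvAltLoop_acc f _ ([] ++ [((pvLowb q : Nat) : Int)])]
      rw [ih (q ^^^ pvLowb q)]
      push_cast
      simp

-- the loop computes pvBitsL on any 32-bit value (fuel ≥ bit width suffices)
theorem pvAltLoop_eq (k : Nat) : ∀ (fuel m : Nat), m < 2 ^ k → k ≤ fuel →
    pvAltLoop fuel ((m : Nat) : Int) [] = pvBitsL m := by
  induction k with
  | zero =>
    intro fuel m hm _
    interval_cases m
    cases fuel <;> simp [pvAltLoop, pvBitsL]
  | succ k ih =>
    intro fuel m hm hf
    by_cases hm0 : m = 0
    · subst hm0; cases fuel <;> simp [pvAltLoop, pvBitsL]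
    · obtain ⟨f, rfl⟩ : ∃ f, fuel = f + 1 := ⟨fuel - 1, by omega⟩
      by_cases hodd : m % 2 = 1
      · -- odd: extract the bit 1, then the doubled remainder
        have hm' : m = 2 * (m / 2) + 1 := by omega
        have hne : ((m : Nat) : Int) ≠ 0 := by simp; omega
        simp only [pvAltLoop, hne, if_false]
        rw [pvBand_neg_self m hm0]
        have hl : pvLowb m = 1 := by rw [hm'] ; exact pvLowb_odd (m / 2)
        rw [hl]
        have hx : PySem.Int.bxor ((m : Nat) : Int) ((1 : Nat) : Int)
            = (((2 * (m / 2) : Nat) : Nat) : Int) := by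
          rw [PySem.Int.bxor_natCast]
          nth_rewrite 1 [hm']
          rw [pvXor_odd_one]
        rw [hx]
        rw [pvAltLoop_acc f _ ([] ++ [((1 : Nat) : Int)])]
        rw [pvAltLoop_double f (m / 2)]
        rw [ih f (m / 2) (by omega) (by omega)]
        conv_rhs => rw [pvBitsL]
        simp [hm0, hodd]
      · -- even: the doubling lemma applies without unfolding the loop
        have hm' : m = 2 * (m / 2) := by omega
        nth_rewrite 1 [hm']
        rw [pvAltLoop_double (f + 1) (m / 2), ih (f + 1) (m / 2) (by omega) (by omega)]
        conv_rhs => rw [pvBitsL]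
        simp [hm0, hodd]

-- the binary recursion produces exactly the positional (range-scan) list
theorem pvBitsL_eq_bitsUp (k : Nat) : ∀ (m : Nat), m < 2 ^ k → pvBitsL m = pvBitsUp k m := by
  induction k with
  | zero =>
    intro m hm
    interval_cases m
    simp [pvBitsL, pvBitsUp]
  | succ k ih =>
    intro m hm
    by_cases hm0 : m = 0
    · subst hm0
      simp [pvBitsL, pvBitsUp, Nat.zero_testBit]
    · rw [pvBitsL]
      unfold pvBitsUp
      rw [List.range_succ_eq_map]
      have hsucc : ∀ i : Nat, m.testBit (Nat.succ i) = (m / 2).testBit i := fun i => Nat.testBit_succ m i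
      simp only [List.filter_cons, List.filter_map, Nat.testBit_zero]
      rw [ih (m / 2) (by omega)]
      unfold pvBitsUp
      by_cases hodd : m % 2 = 1
      · simp [hm0, hodd, hsucc, Function.comp_def, List.map_map, pow_succ, mul_comm]
      · simp [hm0, hodd, hsucc, Function.comp_def, List.map_map, pow_succ, mul_comm]

-- A's fold builds exactly the positional list of the masked value
theorem pvA_eq (num : Int) :
    split_into_powers_of_two_py num
      = (if pvBitsUp 32 (pvM num) = [] then [0] else pvBitsUp 32 (pvM num)) := by
  have hmask : ((PySem.List.pyRange 0 32 1).map (fun i => (1 : Int) <<< i.toNat))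
      = (List.range 32).map (fun k => (2 : Int) ^ k) := by
    rw [PySem.List.pyRange_one]
    simp only [List.map_map, Function.comp_def]
    apply List.map_congr_left
    intro a _
    rw [zero_add, Int.toNat_natCast, Int.one_shiftLeft]
    push_cast
    ring
  have hfilter : ((List.range 32).map (fun k => (2 : Int) ^ k)).filter
        (fun mask => decide (PySem.Int.band mask num ≠ 0)) = pvBitsUp 32 (pvM num) := by
    rw [List.filter_map]
    unfold pvBitsUp
    congr 1
    apply List.filter_congr
    intro x hx
    have hx32 : x < 32 := List.mem_range.mp hx
    have htest := pvTest_eq num x hx32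
    rw [Bool.eq_iff_iff]
    simpa using htest
  simp only [split_into_powers_of_two_py]
  rw [hmask, PySem.List.foldl_append_ite_eq_filter (fun mask => PySem.Int.band mask num ≠ 0)]
  rw [List.nil_append, hfilter]

-- B's loop builds exactly the binary-recursion list of the masked value
theorem pvB_eq (num : Int) :
    split_into_powers_of_two_py_alt num
      = (if pvBitsL (pvM num) = [] then [0] else pvBitsL (pvM num)) := by
  simp only [split_into_powers_of_two_py_alt]
  rw [show (0xFFFFFFFF : Int) = 4294967295 from rfl, pvM_cast num,
      pvAltLoop_eq 32 32 (pvM num) (pvM_lt num) le_rfl]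

-- ===== VERDICT (by name: the statement is the Claim_ definition above) =====
theorem split_into_powers_of_two_py_spec : Claim_equal_split_into_powers_of_two_py := by
  intro num _
  unfold Spec_split_into_powers_of_two_py
  rw [pvA_eq, pvB_eq, pvBitsL_eq_bitsUp 32 (pvM num) (pvM_lt num)]
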